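-- pv_equiv track=rewrite | github.com/V2LLAIN/Capstone | VAS_1.1/src/Truck.py | cvt_border2frontback
-- ===== SOURCE A (Python) =====
-- def cvt_border2frontback(compress_detections):
--
--     first_1_flag = False
--     indent_flag = False
--
--     current_elem = None
--     current_count = 0
--
--     for idx in range(len(compress_detections)):
--         elem = compress_detections[idx]
--
--         if elem != current_elem:
--             current_elem = elem
--             current_count = 0
--         else:
--             current_count += 1
--
--
--         if (current_elem == 1) and (first_1_flag == False): first_1_flag = True
--         if (current_elem == -1) and (first_1_flag == True) and (indent_flag == False): indent_flag = True
--         if (current_elem == 1) and (first_1_flag == True) and (indent_flag == True):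
--             compress_detections[idx] = 2
--
--     return compress_detections
-- ===== SOURCE B (Python) =====
-- def cvt_border2frontback(compress_detections):
--     # Boundary-search decomposition: find the first 1, then the first -1 after it,
--     # then convert every later 1 to 2 (in place, returning the same list).
--     n = len(compress_detections)
--     p = next((i for i in range(n) if compress_detections[i] == 1), None)
--     if p is None:
--         return compress_detections
--     q = next((i for i in range(p + 1, n) if compress_detections[i] == -1), None)
--     if q is None:
--         return compress_detections
--     for i in range(q + 1, n):
--         if compress_detections[i] == 1:
--             compress_detections[i] = 2
--     return compress_detections
-- ===== Notes on version B (the rewrite author's own statement) =====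
-- stated objective: alternative
-- what changed: Replaced the single flag-state scan (two booleans plus dead run-length state threaded through every element) with two boundary searches (first 1, then first -1 after it) followed by one transform pass over the tail; the dead current_elem/current_count bookkeeping disappears.
import Mathlib
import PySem

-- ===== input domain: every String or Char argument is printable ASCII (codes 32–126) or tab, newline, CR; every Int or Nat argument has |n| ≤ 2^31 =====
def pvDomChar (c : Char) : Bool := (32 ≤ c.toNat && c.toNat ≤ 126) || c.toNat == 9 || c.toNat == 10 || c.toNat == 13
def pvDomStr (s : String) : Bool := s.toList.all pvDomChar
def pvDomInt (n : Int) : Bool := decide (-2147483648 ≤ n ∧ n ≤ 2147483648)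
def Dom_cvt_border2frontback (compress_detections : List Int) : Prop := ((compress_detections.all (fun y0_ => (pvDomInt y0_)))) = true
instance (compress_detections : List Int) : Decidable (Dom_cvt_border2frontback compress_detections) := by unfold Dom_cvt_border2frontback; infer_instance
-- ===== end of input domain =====

-- B replaces A's flag-state scan by two boundary searches plus one tail transform pass
-- (objective: alternative decomposition). A mutates its argument in place; the equivalence
-- proved here is about the RETURN value (B performs the same in-place mutation in Python).

-- ===== PORT A =====
-- one step per element: run-tracking state (current_elem, current_count) plus the two flags,
-- writing back 2 at the current index when both flags are set and the element is 1
def goA : List Int → Bool → Bool → Option Int → Int → List Int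
  | [], _, _, _, _ => []
  | e :: rest, f1, ind, cur, cnt =>
    let s := if some e ≠ cur then (some e, (0 : Int)) else (cur, cnt + 1)
    let cur' := s.1
    let cnt' := s.2
    let f1' := if cur' = some 1 ∧ f1 = false then true else f1
    let ind' := if cur' = some (-1) ∧ f1' = true ∧ ind = false then true else ind
    let e' := if cur' = some 1 ∧ f1' = true ∧ ind' = true then (2 : Int) else e
    e' :: goA rest f1' ind' cur' cnt'

def cvt_border2frontback (compress_detections : List Int) : List Int :=
  goA compress_detections false false none 0

-- ===== PORT B =====
-- first index of 1, then first index of -1 after it, then convert later 1s to 2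
def cvt_border2frontback_alt (compress_detections : List Int) : List Int :=
  match compress_detections.findIdx? (fun x => x == 1) with
  | none => compress_detections
  | some p =>
    match (compress_detections.drop (p + 1)).findIdx? (fun x => x == -1) with
    | none => compress_detections
    | some q0 =>
      compress_detections.take (p + 1 + q0 + 1) ++
        (compress_detections.drop (p + 1 + q0 + 1)).map (fun x => if x = 1 then 2 else x)

-- ===== PRECONDITION & SPEC =====
def Spec_cvt_border2frontback (compress_detections : List Int) (out : List Int) : Prop := out = cvt_border2frontback_alt compress_detections
instance (compress_detections : List Int) (out : List Int) : Decidable (Spec_cvt_border2frontback compress_detections out) := by unfold Spec_cvt_border2frontback; infer_instance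

-- ===== CLAIM (what is proved, stated in full; the proofs are below) =====
def Claim_equal_cvt_border2frontback : Prop := ∀ (compress_detections : List Int), Dom_cvt_border2frontback compress_detections → Spec_cvt_border2frontback compress_detections (cvt_border2frontback compress_detections)

-- ===== LEMMAS AND PROOFS =====

-- one unfolded step of goA: after the update, current_elem is always the element just read
theorem goA_cons (e : Int) (rest : List Int) (f1 ind : Bool) (cur : Option Int) (cnt : Int) :
    goA (e :: rest) f1 ind cur cnt =
      (let f1' := if e = 1 ∧ f1 = false then true else f1
       let ind' := if e = -1 ∧ f1' = true ∧ ind = false then true else ind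
       let e' := if e = 1 ∧ f1' = true ∧ ind' = true then (2 : Int) else e
       e' :: goA rest f1' ind' (some e) (if some e ≠ cur then 0 else cnt + 1)) := by
  by_cases h : some e ≠ cur
  · simp [goA, h]
  · have hc : cur = some e := by
      rcases Decidable.not_not.mp h with h'; exact h'.symm
    subst hc
    simp [goA]

-- phase 3: both flags set — every remaining 1 becomes 2
theorem goA_tt (l : List Int) : ∀ (cur : Option Int) (cnt : Int),
    goA l true true cur cnt = l.map (fun x => if x = 1 then 2 else x) := by
  induction l with
  | nil => intro cur cnt; rfl
  | cons e rest ih =>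
    intro cur cnt
    rw [goA_cons]
    by_cases he : e = 1 <;> simp [he, ih]

-- phase 2: first 1 seen, waiting for the first -1
theorem goA_tf (l : List Int) : ∀ (cur : Option Int) (cnt : Int),
    goA l true false cur cnt =
      match l.findIdx? (fun x => x == -1) with
      | none => l
      | some q0 => l.take (q0 + 1) ++ (l.drop (q0 + 1)).map (fun x => if x = 1 then 2 else x) := by
  induction l with
  | nil => intro cur cnt; rfl
  | cons e rest ih =>
    intro cur cnt
    rw [goA_cons]
    by_cases he : e = (-1 : Int)
    · subst he
      simp [List.findIdx?_cons, goA_tt]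
    · simp only [he, Bool.true_eq_false, Bool.false_eq_true, false_and, and_false, ite_self,
        if_false]
      have hb : ((fun x => x == (-1 : Int)) e) = false := by simp [he]
      simp only [List.findIdx?_cons, hb, Bool.false_eq_true, reduceIte]
      rw [ih]
      cases hq : rest.findIdx? (fun x => x == -1) with
      | none => simp
      | some q0 => simp [List.take_succ_cons, List.drop_succ_cons]

-- phase 1: no 1 seen yet
theorem goA_ff (l : List Int) : ∀ (cur : Option Int) (cnt : Int),
    goA l false false cur cnt = cvt_border2frontback_alt l := by
  induction l with
  | nil => intro cur cnt; rfl
  | cons e rest ih =>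
    intro cur cnt
    rw [goA_cons]
    by_cases he : e = (1 : Int)
    · subst he
      simp only [cvt_border2frontback_alt, List.findIdx?_cons]
      norm_num
      rw [goA_tf]
      cases hq : rest.findIdx? (fun x => x == -1) with
      | none => simp
      | some q0 => simp [List.drop_succ_cons, Nat.add_comm]
    · have hb : ((fun x => x == (1 : Int)) e) = false := by simp [he]
      simp only [he, false_and, Bool.false_eq_true, and_false, if_false]
      rw [ih]
      simp only [cvt_border2frontback_alt, List.findIdx?_cons, hb, Bool.false_eq_true, reduceIte]
      cases hp : rest.findIdx? (fun x => x == 1) with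
      | none => simp
      | some p =>
        simp only [Option.map_some]
        cases hq : (rest.drop (p + 1)).findIdx? (fun x => x == -1) with
        | none => simp [List.drop_succ_cons, hq]
        | some q0 =>
          have hd : (e :: rest).drop (p + 1 + 1) = rest.drop (p + 1) := by
            simp [List.drop_succ_cons]
          rw [hd, hq]
          simp only [List.take_succ_cons, List.drop_succ_cons, List.cons_append]
          have harith : p + 1 + q0 + 1 = p + 1 + 1 + q0 := by omega
          rw [harith]

-- ===== VERDICT (by name: the statement is the Claim_ definition above) =====
theorem cvt_border2frontback_spec : Claim_equal_cvt_border2frontback := by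
  intro l _
  show cvt_border2frontback l = cvt_border2frontback_alt l
  exact goA_ff l none 0
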